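-- pv_equiv track=rewrite | github.com/prettygood236/coding-challenges | greedy/random_number_game.py | solution
-- ===== SOURCE A (Python) =====
-- def solution(A, B):
--     A.sort()
--     B.sort()
--
--     points = 0
--     b_index = 0
--
--     for x in A:
--         while b_index < len(B) and B[b_index] <= x:
--             b_index += 1
--         if b_index < len(B):
--             points += 1
--             b_index += 1
--
--     return points
-- ===== SOURCE B (Python) =====
-- def solution(A, B):
--     A.sort()
--     B.sort()
--
--     points = 0
--     a_index = 0
--
--     for b in B:
--         if a_index < len(A) and A[a_index] < b:
--             points += 1
--             a_index += 1
--
--     return points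
-- ===== Notes on version B (the rewrite author's own statement) =====
-- stated objective: alternative
-- what changed: Swapped the greedy's decomposition: instead of iterating over A with an inner while-loop skipping B elements, B iterates once over sorted B with a single pointer into A, matching each b to the smallest unmatched a it beats; the inner while-loop disappears.
import Mathlib
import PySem

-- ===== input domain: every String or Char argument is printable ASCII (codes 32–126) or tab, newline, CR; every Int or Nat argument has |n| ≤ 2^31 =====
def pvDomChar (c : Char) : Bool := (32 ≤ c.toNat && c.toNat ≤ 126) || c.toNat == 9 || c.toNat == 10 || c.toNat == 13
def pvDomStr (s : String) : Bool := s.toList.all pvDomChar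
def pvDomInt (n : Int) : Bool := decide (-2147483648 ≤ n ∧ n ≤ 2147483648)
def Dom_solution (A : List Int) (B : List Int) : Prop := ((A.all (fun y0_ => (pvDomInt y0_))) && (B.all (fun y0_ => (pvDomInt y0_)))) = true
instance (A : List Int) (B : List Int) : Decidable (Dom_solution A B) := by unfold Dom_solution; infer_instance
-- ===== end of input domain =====

-- B replaces A's outer-loop-over-A-with-inner-while greedy by a single flat loop over sorted B
-- with one pointer into sorted A («alternative» decomposition, same cost). Both Pythons sort
-- both arguments in place exactly as A does; the equivalence proved here is about the return value.

-- ===== PORT A =====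
-- the inner `while b_index < len(B) and B[b_index] <= x: b_index += 1` loop of A
def pySkip (B : List Int) (x : Int) (bi : Nat) : Nat :=
  if h : bi < B.length ∧ B.getD bi 0 ≤ x then pySkip B x (bi + 1) else bi
termination_by B.length - bi
decreasing_by omega

-- the body of A's `for x in A` loop, state = (points, b_index)
def stepA (B : List Int) (st : Int × Nat) (x : Int) : Int × Nat :=
  let bi := pySkip B x st.2
  if bi < B.length then (st.1 + 1, bi + 1) else (st.1, bi)

def solution (A : List Int) (B : List Int) : Int :=
  let sA := PySem.List.sorted A (fun v => v) false   -- A.sort()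
  let sB := PySem.List.sorted B (fun v => v) false   -- B.sort()
  (sA.foldl (stepA sB) (0, 0)).1

-- ===== PORT B =====
-- the body of B's `for b in B` loop, state = (points, a_index)
def stepB (A : List Int) (st : Int × Nat) (b : Int) : Int × Nat :=
  if st.2 < A.length ∧ A.getD st.2 0 < b then (st.1 + 1, st.2 + 1) else st

def solution_alt (A : List Int) (B : List Int) : Int :=
  let sA := PySem.List.sorted A (fun v => v) false   -- A.sort()
  let sB := PySem.List.sorted B (fun v => v) false   -- B.sort()
  (sB.foldl (stepB sA) (0, 0)).1

-- ===== PRECONDITION & SPEC =====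
def Spec_solution (A : List Int) (B : List Int) (out : Int) : Prop := out = solution_alt A B
instance (A : List Int) (B : List Int) (out : Int) : Decidable (Spec_solution A B out) := by unfold Spec_solution; infer_instance

-- ===== CLAIM (what is proved, stated in full; the proofs are below) =====
def Claim_equal_solution : Prop := ∀ (A : List Int) (B : List Int), Dom_solution A B → Spec_solution A B (solution A B)

-- ===== LEMMAS AND PROOFS =====

-- A's greedy, phrased on lists: match each a to the first remaining b with a < b
def gA : List Int → List Int → Int
  | [], _ => 0
  | a :: as, bs =>
    match bs.dropWhile (fun b => decide (b ≤ a)) with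
    | [] => 0
    | _ :: bs' => 1 + gA as bs'

-- B's greedy, phrased on lists
def hB : List Int → List Int → Int
  | [], _ => 0
  | _, [] => 0
  | a :: as, b :: bs => if a < b then 1 + hB as bs else hB (a :: as) bs
termination_by as bs => bs.length

theorem gA_nil (as : List Int) : gA as [] = 0 := by
  cases as <;> simp [gA]

theorem gA_eq_hB (bs as : List Int) : gA as bs = hB as bs := by
  induction bs generalizing as with
  | nil => cases as <;> simp [gA, hB]
  | cons b bs ih =>
    cases as with
    | nil => simp [gA, hB]
    | cons a as =>
      by_cases hab : a < b
      · have hd : (b :: bs).dropWhile (fun y => decide (y ≤ a)) = b :: bs := by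
          simp [List.dropWhile_cons, not_le.mpr hab]
        simp [gA, hB, hd, hab, ih]
      · have hd : (b :: bs).dropWhile (fun y => decide (y ≤ a))
            = bs.dropWhile (fun y => decide (y ≤ a)) := by
          simp [List.dropWhile_cons, not_lt.mp hab]
        have : gA (a :: as) (b :: bs) = gA (a :: as) bs := by
          simp only [gA, hd]
        rw [this, ih, hB]
        simp [hab]

theorem pySkip_le (B : List Int) (x : Int) (bi : Nat) (h : bi ≤ B.length) :
    pySkip B x bi ≤ B.length := by
  fun_induction pySkip with
  | case1 bi h' ih => exact ih (by omega)
  | case2 => exact h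

theorem drop_pySkip (B : List Int) (x : Int) (bi : Nat) (h : bi ≤ B.length) :
    B.drop (pySkip B x bi) = (B.drop bi).dropWhile (fun b => decide (b ≤ x)) := by
  fun_induction pySkip with
  | case1 bi h' ih =>
    obtain ⟨hlt, hle⟩ := h'
    rw [List.drop_eq_getElem_cons hlt, List.dropWhile_cons]
    have : B.getD bi 0 = B[bi] := List.getD_eq_getElem B 0 hlt
    rw [ih (by omega)]
    simp [this ▸ hle]
  | case2 bi h' =>
    rcases Nat.lt_or_ge bi B.length with hlt | hge
    · have hx : ¬ B.getD bi 0 ≤ x := fun hc => h' ⟨hlt, hc⟩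
      have : B.getD bi 0 = B[bi] := List.getD_eq_getElem B 0 hlt
      rw [List.drop_eq_getElem_cons hlt, List.dropWhile_cons]
      simp [this ▸ hx]
    · have : B.drop bi = [] := List.drop_eq_nil_of_le hge
      simp [this]

theorem foldA_eq (sB : List Int) (as : List Int) :
    ∀ (p : Int) (bi : Nat), bi ≤ sB.length →
      (as.foldl (stepA sB) (p, bi)).1 = p + gA as (sB.drop bi) := by
  induction as with
  | nil => intro p bi _; simp [gA]
  | cons a as ih =>
    intro p bi hbi
    have hbi' : pySkip sB a bi ≤ sB.length := pySkip_le sB a bi hbi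
    have hdrop := drop_pySkip sB a bi hbi
    rcases Nat.lt_or_ge (pySkip sB a bi) sB.length with hlt | hge
    · have hcons : sB.drop (pySkip sB a bi)
          = sB[pySkip sB a bi] :: sB.drop (pySkip sB a bi + 1) :=
        List.drop_eq_getElem_cons hlt
      have hg : gA (a :: as) (sB.drop bi)
          = 1 + gA as (sB.drop (pySkip sB a bi + 1)) := by
        simp only [gA, ← hdrop, hcons]
      rw [List.foldl_cons]
      have hstep : stepA sB (p, bi) a = (p + 1, pySkip sB a bi + 1) := by
        simp [stepA, hlt]
      rw [hstep, ih (p + 1) (pySkip sB a bi + 1) (by omega), hg]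
      ring
    · have hnil : sB.drop (pySkip sB a bi) = [] := List.drop_eq_nil_of_le hge
      have hg : gA (a :: as) (sB.drop bi) = 0 := by
        simp only [gA, ← hdrop, hnil]
      rw [List.foldl_cons]
      have hstep : stepA sB (p, bi) a = (p, pySkip sB a bi) := by
        simp [stepA, Nat.not_lt.mpr hge]
      rw [hstep, ih p (pySkip sB a bi) hbi', hnil, gA_nil, hg]
  
theorem foldB_eq (sA : List Int) (bs : List Int) :
    ∀ (p : Int) (ai : Nat), ai ≤ sA.length →
      (bs.foldl (stepB sA) (p, ai)).1 = p + hB (sA.drop ai) bs := by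
  induction bs with
  | nil =>
    intro p ai _
    cases h : sA.drop ai <;> simp [hB]
  | cons b bs ih =>
    intro p ai hai
    rcases Nat.lt_or_ge ai sA.length with hlt | hge
    · have hcons : sA.drop ai = sA[ai] :: sA.drop (ai + 1) :=
        List.drop_eq_getElem_cons hlt
      have hgetD : sA.getD ai 0 = sA[ai] := List.getD_eq_getElem sA 0 hlt
      by_cases hb : sA[ai] < b
      · have hstep : stepB sA (p, ai) b = (p + 1, ai + 1) := by
          simp only [stepB]
          rw [if_pos ⟨hlt, by rw [hgetD]; exact hb⟩]
        rw [List.foldl_cons, hstep, ih (p + 1) (ai + 1) (by omega), hcons, hB]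
        simp [hb]; ring
      · have hstep : stepB sA (p, ai) b = (p, ai) := by
          simp only [stepB]
          rw [if_neg]
          rintro ⟨_, hc⟩
          rw [hgetD] at hc
          exact hb hc
        rw [List.foldl_cons, hstep, ih p ai hai, hcons, hB]
        simp [hb, ← hcons]
    · have hnil : sA.drop ai = [] := List.drop_eq_nil_of_le hge
      have hstep : stepB sA (p, ai) b = (p, ai) := by
        simp only [stepB]
        rw [if_neg]
        rintro ⟨hc, _⟩
        omega
      rw [List.foldl_cons, hstep, ih p ai (by omega), hnil]
      simp [hB]

-- ===== VERDICT (by name: the statement is the Claim_ definition above) =====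
theorem solution_spec : Claim_equal_solution := by
  intro A B _
  unfold Spec_solution solution solution_alt
  rw [foldA_eq _ _ 0 0 (Nat.zero_le _), foldB_eq _ _ 0 0 (Nat.zero_le _),
    List.drop_zero, List.drop_zero, gA_eq_hB]
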